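-- pv_equiv track=rewrite | github.com/yz002/ist495-dashboard | scrape_finviz_tickers_curl_mongo.py | classify_source_type
-- ===== SOURCE A (Python) =====
-- TRADITIONAL_DOMAINS = {
--     "reuters.com",
--     "bloomberg.com",
--     "wsj.com",
--     "ft.com",
--     "cnbc.com",
--     "marketwatch.com",
--     "finance.yahoo.com",
--     "seekingalpha.com",
--     "investing.com",
--     "sec.gov",
--     "nasdaq.com",
--     "nytimes.com",
--     "apnews.com",
--     "theverge.com",
--     "techcrunch.com",
--     "businesswire.com",
--     "globenewswire.com",
--     "prnewswire.com",
-- }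
--
-- def classify_source_type(domains: list[str]) -> str:
--     if not domains:
--         return "No link"
--     for dom in domains:
--         for trusted in TRADITIONAL_DOMAINS:
--             if dom == trusted or dom.endswith("." + trusted):
--                 return "Traditional"
--     return "Rumor/Social"
-- ===== SOURCE B (Python) =====
-- TRADITIONAL_DOMAINS = {
--     "reuters.com",
--     "bloomberg.com",
--     "wsj.com",
--     "ft.com",
--     "cnbc.com",
--     "marketwatch.com",
--     "finance.yahoo.com",
--     "seekingalpha.com",
--     "investing.com",
--     "sec.gov",
--     "nasdaq.com",
--     "nytimes.com",
--     "apnews.com",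
--     "theverge.com",
--     "techcrunch.com",
--     "businesswire.com",
--     "globenewswire.com",
--     "prnewswire.com",
-- }
--
-- def classify_source_type(domains: list[str]) -> str:
--     if not domains:
--         return "No link"
--     for dom in domains:
--         d = dom
--         while True:
--             if d in TRADITIONAL_DOMAINS:
--                 return "Traditional"
--             _, sep, tail = d.partition(".")
--             if not sep:
--                 break
--             d = tail
--     return "Rumor/Social"
-- ===== Notes on version B (the rewrite author's own statement) =====
-- stated objective: faster
-- what changed: Instead of scanning all 18 trusted domains with ==/endswith tests per input domain, B walks the domain's own dot-boundary suffixes (stripping one leading label at a time) and does a set-membership hash lookup on each, so the inner loop is over the domain's few labels rather than over the trusted set.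
import Mathlib
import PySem

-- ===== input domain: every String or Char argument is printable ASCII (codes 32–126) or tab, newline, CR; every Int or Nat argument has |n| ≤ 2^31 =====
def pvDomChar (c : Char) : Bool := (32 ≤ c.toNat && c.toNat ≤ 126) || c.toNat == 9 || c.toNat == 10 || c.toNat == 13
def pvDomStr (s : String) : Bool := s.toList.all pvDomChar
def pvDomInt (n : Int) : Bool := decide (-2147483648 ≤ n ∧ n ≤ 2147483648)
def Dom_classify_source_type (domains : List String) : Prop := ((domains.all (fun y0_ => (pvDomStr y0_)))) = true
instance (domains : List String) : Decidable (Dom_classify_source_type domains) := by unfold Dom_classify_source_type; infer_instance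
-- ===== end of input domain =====

-- B walks each domain's dot-boundary suffixes with hash-set lookups instead of scanning the 18
-- trusted domains with ==/endswith tests per domain (objective: faster by a constant factor).

-- TRADITIONAL_DOMAINS, as the list of its distinct elements (membership only; order never observed)
def pvTradC : List (List Char) :=
  ["reuters.com".toList, "bloomberg.com".toList, "wsj.com".toList, "ft.com".toList,
   "cnbc.com".toList, "marketwatch.com".toList, "finance.yahoo.com".toList,
   "seekingalpha.com".toList, "investing.com".toList, "sec.gov".toList, "nasdaq.com".toList,
   "nytimes.com".toList, "apnews.com".toList, "theverge.com".toList, "techcrunch.com".toList,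
   "businesswire.com".toList, "globenewswire.com".toList, "prnewswire.com".toList]

-- ===== PORT A =====
-- inner 'for trusted in TRADITIONAL_DOMAINS: if dom == trusted or dom.endswith("." + trusted)'
def pvMatchA (dom : List Char) : Bool :=
  pvTradC.any (fun trusted => dom == trusted || PySem.Chars.endswith dom ('.' :: trusted))

-- outer 'for dom in domains' with early return
def pvLoopA : List (List Char) → String
  | [] => "Rumor/Social"
  | d :: rest => if pvMatchA d then "Traditional" else pvLoopA rest

def classify_source_type (domains : List String) : String :=
  if domains.isEmpty then "No link"
  else pvLoopA (domains.map String.toList)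

-- ===== PORT B =====
-- 'd in TRADITIONAL_DOMAINS' (set membership)
def pvInTrad (d : List Char) : Bool := pvTradC.any (fun t => d == t)

-- tail of d.partition("."): some tail when a "." occurs, none when sep == "" (exact for str.partition's third component)
def pvAfterDot : List Char → Option (List Char)
  | [] => none
  | c :: rest => if c = '.' then some rest else pvAfterDot rest

theorem pvAfterDot_length : ∀ (d t : List Char), pvAfterDot d = some t → t.length < d.length := by
  intro d
  induction d with
  | nil => intro t h; simp [pvAfterDot] at h
  | cons c rest ih =>
      intro t h
      by_cases hc : c = '.'
      · simp [pvAfterDot, hc] at h; simp [← h]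
      · simp [pvAfterDot, hc] at h
        exact Nat.lt_trans (ih t h) (by simp)

-- B's inner 'while True' loop over one domain
def pvLoopBInner (d : List Char) : Bool :=
  if pvInTrad d then true
  else
    match _h : pvAfterDot d with
    | none => false
    | some tail => pvLoopBInner tail
termination_by d.length
decreasing_by exact pvAfterDot_length d tail _h

-- B's outer 'for dom in domains' with early return
def pvLoopB : List (List Char) → String
  | [] => "Rumor/Social"
  | d :: rest => if pvLoopBInner d then "Traditional" else pvLoopB rest

def classify_source_type_alt (domains : List String) : String :=
  if domains.isEmpty then "No link"
  else pvLoopB (domains.map String.toList)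

-- ===== PRECONDITION & SPEC =====
def Spec_classify_source_type (domains : List String) (out : String) : Prop := out = classify_source_type_alt domains
instance (domains : List String) (out : String) : Decidable (Spec_classify_source_type domains out) := by unfold Spec_classify_source_type; infer_instance

-- ===== CLAIM (what is proved, stated in full; the proofs are below) =====
def Claim_equal_classify_source_type : Prop := ∀ (domains : List String), Dom_classify_source_type domains → Spec_classify_source_type domains (classify_source_type domains)

-- ===== LEMMAS AND PROOFS =====

-- the dot-boundary suffixes of d are exactly: the tail after the FIRST dot, and the dot suffixes of that tail
theorem pvDotSuffix_iff (d v : List Char) :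
    ('.' :: v <:+ d) ↔ (pvAfterDot d = some v ∨ ∃ a, pvAfterDot d = some a ∧ '.' :: v <:+ a) := by
  induction d with
  | nil => simp [pvAfterDot]
  | cons c rest ih =>
      rw [List.suffix_cons_iff]
      by_cases hc : c = '.'
      · subst hc
        have hA : pvAfterDot ('.' :: rest) = some rest := by simp [pvAfterDot]
        rw [hA]
        constructor
        · rintro (h | h)
          · injection h with _ h2; exact Or.inl (by rw [h2])
          · exact Or.inr ⟨rest, rfl, h⟩
        · rintro (h | ⟨a, ha, hs⟩)
          · injection h with h; exact Or.inl (by rw [h])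
          · injection ha with ha; subst ha; exact Or.inr hs
      · have hA : pvAfterDot (c :: rest) = pvAfterDot rest := by simp [pvAfterDot, hc]
        rw [hA]
        constructor
        · rintro (h | h)
          · injection h with h1 _; exact absurd h1.symm hc
          · exact ih.mp h
        · intro h; exact Or.inr (ih.mpr h)

theorem pvLoopBInner_iff (d : List Char) :
    pvLoopBInner d = true ↔ ∃ v, (v = d ∨ '.' :: v <:+ d) ∧ pvInTrad v = true := by
  induction d using pvLoopBInner.induct with
  | case1 d hin =>
      rw [pvLoopBInner, if_pos hin]
      exact ⟨fun _ => ⟨d, Or.inl rfl, hin⟩, fun _ => rfl⟩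
  | case2 d hin hnone =>
      rw [pvLoopBInner, if_neg hin, hnone]
      simp only [Bool.false_eq_true, false_iff]
      rintro ⟨v, hv | hv, hmem⟩
      · exact hin (hv ▸ hmem)
      · rcases (pvDotSuffix_iff d v).mp hv with h | ⟨a, ha, _⟩
        · simp [hnone] at h
        · simp [hnone] at ha
  | case3 d hin tail htail ih =>
      rw [pvLoopBInner, if_neg hin, htail]
      rw [ih]
      constructor
      · rintro ⟨v, hv | hv, hmem⟩
        · exact ⟨v, Or.inr ((pvDotSuffix_iff d v).mpr (Or.inl (hv ▸ htail))), hmem⟩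
        · exact ⟨v, Or.inr ((pvDotSuffix_iff d v).mpr (Or.inr ⟨tail, htail, hv⟩)), hmem⟩
      · rintro ⟨v, hv | hv, hmem⟩
        · exact absurd (hv ▸ hmem) hin
        · rcases (pvDotSuffix_iff d v).mp hv with h | ⟨a, ha, hs⟩
          · have hv2 : tail = v := by
              have := htail.symm.trans h; injection this
            exact ⟨v, Or.inl hv2.symm, hmem⟩
          · have ha2 : tail = a := by
              have := htail.symm.trans ha; injection this
            exact ⟨v, Or.inr (ha2 ▸ hs), hmem⟩

theorem pvInTrad_iff (v : List Char) : pvInTrad v = true ↔ v ∈ pvTradC := by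
  simp [pvInTrad, List.any_eq_true]

theorem pvMatchA_eq (d : List Char) : pvMatchA d = pvLoopBInner d := by
  rw [Bool.eq_iff_iff, pvLoopBInner_iff, pvMatchA, List.any_eq_true]
  simp only [Bool.or_eq_true, beq_iff_eq, PySem.Chars.endswith_iff, pvInTrad_iff]
  constructor
  · rintro ⟨t, ht, h | h⟩
    · exact ⟨t, Or.inl h.symm, ht⟩
    · exact ⟨t, Or.inr h, ht⟩
  · rintro ⟨v, h | h, hv⟩
    · exact ⟨v, hv, Or.inl h.symm⟩
    · exact ⟨v, hv, Or.inr h⟩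

theorem pvLoopA_eq (l : List (List Char)) : pvLoopA l = pvLoopB l := by
  induction l with
  | nil => rfl
  | cons d rest ih => simp [pvLoopA, pvLoopB, pvMatchA_eq, ih]

-- ===== VERDICT (by name: the statement is the Claim_ definition above) =====
theorem classify_source_type_spec : Claim_equal_classify_source_type := by
  intro domains _
  unfold Spec_classify_source_type classify_source_type classify_source_type_alt
  rw [pvLoopA_eq]
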